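-- pv_equiv track=rewrite | github.com/STkangyh/Algorithm_Practice | 4/파이썬 기본코드/외톨이알파벳.py | solution
-- ===== SOURCE A (Python) =====
-- from collections import Counter
--
-- def solution(input_string):
--     answer = ''
--     hash = []
--     hash.append(input_string[0])
--     for i in range(1,len(input_string)):
--         if input_string[i-1]!=input_string[i]:
--             hash.append(input_string[i])
--     sH = Counter(sorted(hash))
--     for x in sH:
--         if sH[x]>1:
--             answer+=x
--     if answer == "":
--         answer = "N"
--     return answer
-- ===== SOURCE B (Python) =====
-- def solution(input_string):
--     prev = input_string[0]
--     seen = {prev}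
--     repeat = set()
--     for c in input_string[1:]:
--         if c != prev:
--             if c in seen:
--                 repeat.add(c)
--             else:
--                 seen.add(c)
--             prev = c
--     return ''.join(sorted(repeat)) or 'N'
-- ===== Notes on version B (the rewrite author's own statement) =====
-- stated objective: alternative
-- what changed: B replaces A's three-phase pipeline (build the run-compressed list, Counter it after sorting, rescan the counter for multiplicities > 1) with a single left-to-right scan that maintains 'seen'/'repeat' sets and detects a character restarting a run on the fly, sorting only the final repeat set.
import Mathlib
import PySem

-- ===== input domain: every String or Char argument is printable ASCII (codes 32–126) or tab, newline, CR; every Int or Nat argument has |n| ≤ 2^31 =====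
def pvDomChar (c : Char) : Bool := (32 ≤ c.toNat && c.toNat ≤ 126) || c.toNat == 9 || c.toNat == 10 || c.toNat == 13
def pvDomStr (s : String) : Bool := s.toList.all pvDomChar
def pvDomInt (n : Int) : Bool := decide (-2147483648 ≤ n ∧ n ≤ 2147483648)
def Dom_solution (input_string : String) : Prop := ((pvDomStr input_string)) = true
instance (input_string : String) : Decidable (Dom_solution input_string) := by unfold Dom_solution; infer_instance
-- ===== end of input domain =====

-- B replaces A's compress-then-Counter-then-rescan with a single left scan keeping
-- 'seen'/'repeat' sets (objective: alternative decomposition, same asymptotic cost).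

-- ===== PORT A =====
def solution (input_string : String) : String :=
  let cs := input_string.toList
  match PySem.List.pyGet? cs 0 with
  | none => ""   -- input_string[0] raises IndexError on "" (excluded by Pre_solution)
  | some c0 =>
    -- hash = [s[0]]; for i in range(1, len(s)): if s[i-1] != s[i]: hash.append(s[i])
    let hash := (PySem.List.pyRange 1 (cs.length : Int) 1).foldl
      (fun h i => if PySem.List.pyGetD cs (i - 1) c0 ≠ PySem.List.pyGetD cs i c0
                  then h ++ [PySem.List.pyGetD cs i c0] else h) [c0]
    -- sH = Counter(sorted(hash))
    let sH := PySem.Dict.counter (PySem.List.sorted hash (fun x => x) false)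
    -- for x in sH: if sH[x] > 1: answer += x
    let answer := sH.keys.foldl
      (fun a x => if sH.getD x 0 > 1 then a ++ [x] else a) ([] : List Char)
    if answer = [] then "N" else String.ofList answer

-- ===== PORT B =====
def solution_alt (input_string : String) : String :=
  match input_string.toList with
  | [] => ""   -- prev = input_string[0] raises IndexError on "" in B too (excluded by Pre_solution)
  | p :: rest =>
    let st := rest.foldl
      (fun (st : Char × PySem.Set Char × PySem.Set Char) c =>
        if c ≠ st.1 then
          if PySem.Set.contains st.2.1 c
          then (c, st.2.1, PySem.Set.add st.2.2 c)
          else (c, PySem.Set.add st.2.1 c, st.2.2)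
        else st)
      (p, PySem.Set.ofList [p], PySem.Set.empty)
    let r := PySem.List.sorted st.2.2 (fun x => x) false
    if r = [] then "N" else String.ofList r

-- ===== PRECONDITION & SPEC =====
-- Pre_ excludes only the empty string, on which both A and B raise IndexError at input_string[0].
def Pre_solution (input_string : String) : Prop := input_string.toList ≠ []
instance (input_string : String) : Decidable (Pre_solution input_string) := by
  unfold Pre_solution; infer_instance
def pvWitness_solution : String := "aabac"

def Spec_solution (input_string : String) (out : String) : Prop := out = solution_alt input_string
instance (input_string : String) (out : String) : Decidable (Spec_solution input_string out) := by
  unfold Spec_solution; infer_instance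

-- ===== CLAIM (what is proved, stated in full; the proofs are below) =====
def Claim_equal_solution : Prop := ∀ (input_string : String), Dom_solution input_string → Pre_solution input_string → Spec_solution input_string (solution input_string)

-- ===== LEMMAS AND PROOFS =====

/-- Heads of the runs started strictly after a position whose character is `prev`. -/
def runAux : Char → List Char → List Char
  | _, [] => []
  | prev, c :: r => if c ≠ prev then c :: runAux c r else runAux prev r

/-- A's index loop over `range(1, len(cs))` computes the run heads of the tail. -/
lemma hashLoop (cs : List Char) (d : Char) :
    ∀ (k j : Nat) (acc : List Char), cs.length = j + k → 1 ≤ j →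
    (PySem.List.pyRange (j : Int) (cs.length : Int) 1).foldl
      (fun h i => if PySem.List.pyGetD cs (i - 1) d ≠ PySem.List.pyGetD cs i d
                  then h ++ [PySem.List.pyGetD cs i d] else h) acc
    = acc ++ runAux (cs.getD (j - 1) d) (cs.drop j) := by
  intro k
  induction k with
  | zero =>
    intro j acc hlen hj
    have hdrop : cs.drop j = [] := by
      simp [List.drop_eq_nil_iff]; omega
    simp [hlen, PySem.List.pyRange, hdrop, runAux]
  | succ k ih =>
    intro j acc hlen hj
    have hjlt : j < cs.length := by omega
    rw [PySem.List.pyRange_one_cons (by exact_mod_cast hjlt)]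
    rw [List.foldl_cons]
    have hc1 : ((j : Int) - 1) = ((j - 1 : Nat) : Int) := by omega
    have hgj : PySem.List.pyGetD cs (j : Int) d = cs.getD j d := PySem.List.pyGetD_natCast cs j d
    have hgj1 : PySem.List.pyGetD cs ((j : Int) - 1) d = cs.getD (j - 1) d := by
      rw [hc1]; exact PySem.List.pyGetD_natCast cs (j - 1) d
    have hdrop : cs.drop j = cs.getD j d :: cs.drop (j + 1) := by
      rw [List.getD_eq_getElem _ _ hjlt]
      exact List.drop_eq_getElem_cons hjlt
    have hcast : ((j : Int) + 1) = ((j + 1 : Nat) : Int) := by push_cast; ring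
    rw [hgj, hgj1, hdrop, runAux]
    by_cases heq : cs.getD (j - 1) d = cs.getD j d
    · rw [if_neg (not_ne_iff.mpr heq), if_neg (not_ne_iff.mpr heq.symm), hcast,
        ih (j + 1) acc (by omega) (by omega)]
      have h1 : cs.getD (j + 1 - 1) d = cs.getD (j - 1) d := by
        simp only [Nat.add_sub_cancel]; rw [heq]
      rw [h1]
    · rw [if_pos heq, if_pos (Ne.symm heq), hcast,
        ih (j + 1) (acc ++ [cs.getD j d]) (by omega) (by omega)]
      simp

/-- Invariant of B's scan: `repeat` stays duplicate-free and holds exactly the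
characters occurring at least twice among the run heads seen so far. -/
lemma bLoop (l : List Char) :
    ∀ (prev : Char) (seen rep H0 : List Char),
    (∀ x, x ∈ seen ↔ x ∈ H0) → rep.Nodup → (∀ x, x ∈ rep ↔ 2 ≤ H0.count x) →
    (l.foldl
      (fun (st : Char × PySem.Set Char × PySem.Set Char) c =>
        if c ≠ st.1 then
          if PySem.Set.contains st.2.1 c
          then (c, st.2.1, PySem.Set.add st.2.2 c)
          else (c, PySem.Set.add st.2.1 c, st.2.2)
        else st) (prev, seen, rep)).2.2.Nodup ∧
    ∀ x, x ∈ (l.foldl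
      (fun (st : Char × PySem.Set Char × PySem.Set Char) c =>
        if c ≠ st.1 then
          if PySem.Set.contains st.2.1 c
          then (c, st.2.1, PySem.Set.add st.2.2 c)
          else (c, PySem.Set.add st.2.1 c, st.2.2)
        else st) (prev, seen, rep)).2.2 ↔ 2 ≤ (H0 ++ runAux prev l).count x := by
  induction l with
  | nil =>
    intro prev seen rep H0 _ hnd hrep
    simpa [runAux] using ⟨hnd, hrep⟩
  | cons c r ih =>
    intro prev seen rep H0 hseen hnd hrep
    rw [List.foldl_cons]
    by_cases hc : c = prev
    · have hstep : (if (c ≠ prev) then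
          (if PySem.Set.contains seen c
           then (c, seen, PySem.Set.add rep c)
           else (c, PySem.Set.add seen c, rep))
          else ((prev, seen, rep) : Char × PySem.Set Char × PySem.Set Char)) = (prev, seen, rep) := by
        simp [hc]
      rw [hstep]
      have h2 := ih prev seen rep H0 hseen hnd hrep
      simpa [runAux, hc] using h2
    · have hstep : (if (c ≠ prev) then
          (if PySem.Set.contains seen c
           then (c, seen, PySem.Set.add rep c)
           else (c, PySem.Set.add seen c, rep))
          else ((prev, seen, rep) : Char × PySem.Set Char × PySem.Set Char))
          = (if PySem.Set.contains seen c
             then (c, seen, PySem.Set.add rep c)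
             else (c, PySem.Set.add seen c, rep)) := by
        simp [hc]
      rw [hstep]
      have hrun : runAux prev (c :: r) = c :: runAux c r := by simp [runAux, hc]
      by_cases hm : c ∈ seen
      · have hcH0 : c ∈ H0 := (hseen c).mp hm
        rw [if_pos ((PySem.Set.contains_iff seen c).mpr hm)]
        have h := ih c seen (PySem.Set.add rep c) (H0 ++ [c])
          (fun x => by
            rw [hseen x]
            constructor
            · intro h; exact List.mem_append_left _ h
            · intro h; rcases List.mem_append.mp h with h | h
              · exact h
              · simpa using (List.mem_singleton.mp h ▸ hcH0))
          (by
            by_cases h : c ∈ rep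
            · rwa [PySem.Set.add_of_mem h]
            · rw [PySem.Set.add_of_not_mem h]
              exact List.Nodup.append hnd (List.nodup_singleton c)
                (fun a ha hb => h ((List.mem_singleton.mp hb) ▸ ha)))
          (fun x => by
            rw [PySem.Set.mem_add, hrep x, List.count_append]
            by_cases hx : x = c
            · subst hx
              have h1 : 1 ≤ H0.count x := List.one_le_count_iff.mpr hcH0
              have h2 : List.count x [x] = 1 := by simp
              rw [h2]
              constructor
              · intro _; omega
              · intro _; right; rfl
            · have h2 : List.count x [c] = 0 := List.count_eq_zero.mpr (by simp [hx])
              rw [h2]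
              simp [hx])
        rw [hrun]
        refine ⟨h.1, fun x => ?_⟩
        rw [h.2 x, List.append_assoc, List.singleton_append]
      · have hcH0 : c ∉ H0 := fun h => hm ((hseen c).mpr h)
        rw [if_neg (by simpa [PySem.Set.contains_iff] using hm)]
        have h := ih c (PySem.Set.add seen c) rep (H0 ++ [c])
          (fun x => by
            rw [PySem.Set.mem_add, hseen x, List.mem_append, List.mem_singleton])
          hnd
          (fun x => by
            rw [hrep x, List.count_append]
            by_cases hx : x = c
            · subst hx
              have h0 : H0.count x = 0 := List.count_eq_zero.mpr hcH0
              have h2 : List.count x [x] = 1 := by simp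
              rw [h0, h2]
              omega
            · have h2 : List.count x [c] = 0 := List.count_eq_zero.mpr (by simp [hx])
              rw [h2]
              omega)
        rw [hrun]
        refine ⟨h.1, fun x => ?_⟩
        rw [h.2 x, List.append_assoc, List.singleton_append]

/-- The ordered dedup of a list is one of its sublists. -/
lemma ofList_sublist (l : List Char) : (PySem.Set.ofList l).Sublist l := by
  induction l with
  | nil => simp [PySem.Set.ofList]
  | cons x xs ih =>
    rw [PySem.Set.ofList_cons]
    refine List.Sublist.cons₂ x (List.Sublist.trans ?_ ih)
    simp only [PySem.Set.discard]
    exact List.filter_sublist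

/-- The ordered dedup of a `≤`-sorted list is strictly increasing. -/
lemma ofList_pairwise_lt (l : List Char) (h : l.Pairwise (· ≤ ·)) :
    (PySem.Set.ofList l).Pairwise (· < ·) := by
  have hle : (PySem.Set.ofList l).Pairwise (· ≤ ·) := h.sublist (ofList_sublist l)
  have hnd : (PySem.Set.ofList l).Nodup := PySem.Set.nodup_ofList l
  exact (hle.and hnd).imp (fun h => lt_of_le_of_ne h.1 h.2)

-- ===== VERDICT (by name: the statement is the Claim_ definition above) =====
theorem solution_spec : Claim_equal_solution := by
  intro s _ hpre
  unfold Spec_solution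
  rcases hcs : s.toList with _ | ⟨p, rest⟩
  · exact absurd hcs hpre
  · have hget : PySem.List.pyGet? (p :: rest) (0 : Int) = some p := by
      exact PySem.List.pyGet?_ofNat (p :: rest) 0 (by simp)
    have hhash :
        (PySem.List.pyRange 1 (((p :: rest).length : Nat) : Int) 1).foldl
          (fun h i => if PySem.List.pyGetD (p :: rest) (i - 1) p ≠ PySem.List.pyGetD (p :: rest) i p
                      then h ++ [PySem.List.pyGetD (p :: rest) i p] else h) [p]
        = p :: runAux p rest := by
      have h := hashLoop (p :: rest) p rest.length 1 [p] (by rw [List.length_cons]; omega) (by omega)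
      simpa using h
    -- abbreviations
    set H : List Char := p :: runAux p rest with hH
    set sortedH : List Char := PySem.List.sorted H (fun x => x) false with hsH
    have hcnt : ∀ x, List.count x sortedH = List.count x H :=
      fun x => (PySem.List.sorted_perm H (fun x => x) false).count_eq x
    -- A's answer list
    have hfold :
        (PySem.Set.ofList sortedH).foldl
          (fun a x => if (PySem.Dict.counter sortedH).getD x 0 > 1 then a ++ [x] else a)
          ([] : List Char)
        = (PySem.Set.ofList sortedH).filter
            (fun x => decide ((1 : Int) < (List.count x sortedH : Int))) := by
      simp only [gt_iff_lt, PySem.Dict.getD_counter]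
      simpa using PySem.List.foldl_append_ite_eq_filter
        (fun x => (1 : Int) < (List.count x sortedH : Int)) (PySem.Set.ofList sortedH) []
    set answer : List Char := (PySem.Set.ofList sortedH).filter
        (fun x => decide ((1 : Int) < (List.count x sortedH : Int))) with hans
    -- B's repeat set
    have hb := bLoop rest p (PySem.Set.ofList [p]) PySem.Set.empty [p]
      (fun x => by simp [PySem.Set.mem_ofList])
      (by simp [PySem.Set.empty])
      (fun x => by
        constructor
        · intro h; simp [PySem.Set.empty] at h
        · intro h
          have hle : List.count x [p] ≤ 1 := by
            simpa using List.count_le_length (a := x) (l := [p])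
          omega)
    set rep : List Char := (rest.foldl
      (fun (st : Char × PySem.Set Char × PySem.Set Char) c =>
        if c ≠ st.1 then
          if PySem.Set.contains st.2.1 c
          then (c, st.2.1, PySem.Set.add st.2.2 c)
          else (c, PySem.Set.add st.2.1 c, st.2.2)
        else st) (p, PySem.Set.ofList [p], PySem.Set.empty)).2.2 with hrep
    have hrepmem : ∀ x, x ∈ rep ↔ 2 ≤ List.count x H := by
      intro x
      rw [hrep, hb.2 x, List.singleton_append]
    -- the two result lists agree
    have hansnd : answer.Nodup := (PySem.Set.nodup_ofList sortedH).filter _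
    have hmemH : ∀ x, x ∈ sortedH ↔ x ∈ H := by
      intro x; rw [hsH]; exact PySem.List.mem_sorted H (fun x => x) false x
    have hansmem : ∀ x, x ∈ answer ↔ 2 ≤ List.count x H := by
      intro x
      rw [hans, List.mem_filter]
      simp only [PySem.Set.mem_ofList, decide_eq_true_eq, hcnt x, hmemH x]
      constructor
      · rintro ⟨-, h⟩
        omega
      · intro h
        exact ⟨List.one_le_count_iff.mp (by omega), by omega⟩
    have hperm : answer.Perm rep :=
      (List.perm_ext_iff_of_nodup hansnd hb.1).mpr
        (fun x => by rw [hansmem x, hrepmem x])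
    have hpw : answer.Pairwise (· < ·) :=
      (ofList_pairwise_lt sortedH
        (by simpa using PySem.List.sorted_pairwise H (fun x => x))).filter _
    have hsr : PySem.List.sorted rep (fun x => x) false = answer :=
      PySem.List.sorted_eq_of_perm_of_pairwise_lt rep answer (fun x => x) hperm hpw
    -- assemble
    simp only [solution, solution_alt, hcs, hget, hhash]
    rw [← hsH, PySem.Dict.keys_counter, hfold, ← hrep, hsr]
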